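-- pv_equiv track=rewrite | github.com/joszamama/unifuzz | fuzzers/GrammarUnpacker.py | grammar_unpacker
-- ===== SOURCE A (Python) =====
-- def grammar_unpacker(grammar: dict, depth: int) -> dict:
--     """
--     Unpack the grammar to a given depth.
--     """
--     unpacked_grammar = {}
--
--     # Helper function to generate unpacked rules
--     def unpack_rule(symbol, current_depth):
--         if current_depth >= depth:
--             return [symbol * depth]  # Return the symbol repeated to the depth
--         unpacked_rule = []
--         for item in grammar[symbol]:
--             if item in grammar:
--                 unpacked_rule.extend(unpack_rule(item, current_depth + 1))
--             else:
--                 unpacked_rule.append(item)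
--         return unpacked_rule
--
--     for symbol in grammar:
--         unpacked_grammar[symbol] = unpack_rule(symbol, 0)
--
--     return unpacked_grammar
-- ===== SOURCE B (Python) =====
-- def grammar_unpacker(grammar: dict, depth: int) -> dict:
--     """
--     Unpack the grammar to a given depth, memoizing each (symbol, remaining-depth)
--     expansion so identical subtrees are computed once (top-down DP).
--     """
--     memo = {}
--
--     def unpack(symbol, remaining):
--         key = (symbol, remaining)
--         if key in memo:
--             return memo[key]
--         if remaining == 0:
--             result = [symbol * depth]
--         else:
--             result = []
--             for item in grammar[symbol]:
--                 if item in grammar: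
--                     result += unpack(item, remaining - 1)
--                 else:
--                     result.append(item)
--         memo[key] = result
--         return result
--
--     top = max(depth, 0)
--     return {s: unpack(s, top) for s in grammar}
-- ===== Notes on version B (the rewrite author's own statement) =====
-- stated objective: alternative
-- what changed: B replaces A's plain recursive expansion with top-down dynamic programming: a memo dictionary keyed by (symbol, remaining depth) is threaded through the recursion so each identical subtree is expanded once instead of once per occurrence (same cost on grammars without shared nonterminal subtrees).
import Mathlib
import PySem

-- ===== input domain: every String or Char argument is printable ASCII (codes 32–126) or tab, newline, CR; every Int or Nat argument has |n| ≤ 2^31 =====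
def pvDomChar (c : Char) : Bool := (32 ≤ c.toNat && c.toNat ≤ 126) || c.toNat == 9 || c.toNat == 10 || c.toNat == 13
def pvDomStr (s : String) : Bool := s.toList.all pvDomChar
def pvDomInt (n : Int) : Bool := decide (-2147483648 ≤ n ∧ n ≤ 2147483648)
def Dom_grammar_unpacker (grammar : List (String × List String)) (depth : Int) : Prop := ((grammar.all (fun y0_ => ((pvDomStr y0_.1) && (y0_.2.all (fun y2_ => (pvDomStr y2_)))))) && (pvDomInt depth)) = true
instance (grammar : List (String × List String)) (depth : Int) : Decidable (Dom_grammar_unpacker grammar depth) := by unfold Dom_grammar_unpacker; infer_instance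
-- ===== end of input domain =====

-- B memoizes each (symbol, remaining-depth) expansion in a dictionary (top-down DP),
-- so identical subtrees of A's plain recursion are computed once; equivalence of the
-- returned value is proved for grammars whose association list has pairwise-distinct keys.


-- ===== PORT A =====
-- helpers shared by both ports for the Python dict primitives on the association list
-- (exact under Pre_: keys are pairwise distinct, so first-match lookup = dict lookup):
-- grammar[s]
def pvLookup (g : List (String × List String)) (s : String) : List String :=
  ((g.find? (fun p => p.1 == s)).map (·.2)).getD []
-- s in grammar
def pvHasKey (g : List (String × List String)) (s : String) : Bool :=
  g.any (fun p => p.1 == s)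
-- symbol * depth  (Python string repetition; negative count gives "")
def pvStrMul (s : String) (n : Int) : String :=
  String.ofList (PySem.List.pyRepeat s.toList n)

mutual
-- unpack_rule(symbol, current_depth)
def unpackRuleA (g : List (String × List String)) (depth : Int) (symbol : String) (cur : Int) : List String :=
  if _h : cur ≥ depth then [pvStrMul symbol depth]
  else unpackRuleAList g depth (pvLookup g symbol) (cur + 1)
termination_by ((depth - cur).toNat, 0)
-- the 'for item in grammar[symbol]' loop, building unpacked_rule (child calls at depth d = cur+1)
def unpackRuleAList (g : List (String × List String)) (depth : Int) (items : List String) (d : Int) : List String :=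
  match items with
  | [] => []
  | item :: rest =>
      if pvHasKey g item then unpackRuleA g depth item d ++ unpackRuleAList g depth rest d
      else item :: unpackRuleAList g depth rest d
termination_by ((depth - d).toNat, items.length + 1)
end

-- for symbol in grammar: unpacked_grammar[symbol] = unpack_rule(symbol, 0)
-- (fresh distinct keys under Pre_, so each dict assignment appends)
def grammar_unpacker (grammar : List (String × List String)) (depth : Int) : List (String × List String) :=
  grammar.foldl (fun acc p => acc ++ [(p.1, unpackRuleA grammar depth p.1 0)]) []

-- ===== PORT B =====
mutual
-- unpack(symbol, remaining), threading the memo dictionary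
def unpackRuleB (g : List (String × List String)) (depth : Int) (symbol : String) (remaining : Nat)
    (memo : PySem.Dict (String × Int) (List String)) :
    List String × PySem.Dict (String × Int) (List String) :=
  match memo.get? (symbol, (remaining : Int)) with
  | some v => (v, memo)
  | none =>
    match remaining with
    | 0 =>
        let r := [pvStrMul symbol depth]
        (r, memo.insert (symbol, ((0 : Nat) : Int)) r)
    | n + 1 =>
        let (r, m1) := unpackRuleBList g depth (pvLookup g symbol) n memo
        (r, m1.insert (symbol, ((n + 1 : Nat) : Int)) r)
termination_by (remaining, 0)
-- the 'for item in grammar[symbol]' loop of B (child calls at remaining = n)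
def unpackRuleBList (g : List (String × List String)) (depth : Int) (items : List String) (n : Nat)
    (memo : PySem.Dict (String × Int) (List String)) :
    List String × PySem.Dict (String × Int) (List String) :=
  match items with
  | [] => ([], memo)
  | item :: rest =>
      if pvHasKey g item then
        let (v, m1) := unpackRuleB g depth item n memo
        let (vs, m2) := unpackRuleBList g depth rest n m1
        (v ++ vs, m2)
      else
        let (vs, m2) := unpackRuleBList g depth rest n memo
        (item :: vs, m2)
termination_by (n, items.length + 1)
end

-- the dict comprehension {s: unpack(s, top) for s in grammar}, threading the memo
def unpackAllB (g : List (String × List String)) (depth : Int) (pending : List (String × List String))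
    (top : Nat) (memo : PySem.Dict (String × Int) (List String)) : List (String × List String) :=
  match pending with
  | [] => []
  | p :: rest =>
      let (r, m1) := unpackRuleB g depth p.1 top memo
      (p.1, r) :: unpackAllB g depth rest top m1

def grammar_unpacker_alt (grammar : List (String × List String)) (depth : Int) : List (String × List String) :=
  unpackAllB grammar depth grammar depth.toNat PySem.Dict.empty

-- ===== PRECONDITION & SPEC =====
-- Pre_ excludes association lists with duplicate keys (they do not represent a Python dict
-- faithfully: dict construction collapses duplicates) and large depths for grammars whose
-- rules mention a grammar key, where CPython's recursion limit makes A raise RecursionError.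
def Pre_grammar_unpacker (grammar : List (String × List String)) (depth : Int) : Prop :=
  (grammar.map Prod.fst).Nodup ∧
    (depth ≤ 900 ∨ ∀ p ∈ grammar, ∀ item ∈ p.2, item ∉ grammar.map Prod.fst)
instance (grammar : List (String × List String)) (depth : Int) : Decidable (Pre_grammar_unpacker grammar depth) := by unfold Pre_grammar_unpacker; infer_instance
def pvWitness_grammar_unpacker : (List (String × List String)) × Int :=
  ([("S", ["a", "S"]), ("T", ["S"])], 2)

def Spec_grammar_unpacker (grammar : List (String × List String)) (depth : Int) (out : List (String × List String)) : Prop := out = grammar_unpacker_alt grammar depth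
instance (grammar : List (String × List String)) (depth : Int) (out : List (String × List String)) : Decidable (Spec_grammar_unpacker grammar depth out) := by unfold Spec_grammar_unpacker; infer_instance

-- ===== CLAIM (what is proved, stated in full; the proofs are below) =====
def Claim_equal_grammar_unpacker : Prop := ∀ (grammar : List (String × List String)) (depth : Int), Dom_grammar_unpacker grammar depth → Pre_grammar_unpacker grammar depth → Spec_grammar_unpacker grammar depth (grammar_unpacker grammar depth)

-- ===== LEMMAS AND PROOFS =====

-- proof-side reference function: the pure value of an expansion at a remaining depth m
mutual
def refSym (g : List (String × List String)) (depth : Int) (s : String) (m : Nat) : List String :=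
  match m with
  | 0 => [pvStrMul s depth]
  | n + 1 => refList g depth (pvLookup g s) n
termination_by (m, 0)
def refList (g : List (String × List String)) (depth : Int) (items : List String) (n : Nat) : List String :=
  match items with
  | [] => []
  | item :: rest =>
      if pvHasKey g item then refSym g depth item n ++ refList g depth rest n
      else item :: refList g depth rest n
termination_by (n, items.length + 1)
end

-- A's recursion computes the reference value
mutual
theorem unpackRuleA_eq_ref (g : List (String × List String)) (depth : Int) (s : String) (cur : Int) :
    unpackRuleA g depth s cur = refSym g depth s (depth - cur).toNat := by
  rw [unpackRuleA]
  by_cases h : cur ≥ depth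
  · have h0 : (depth - cur).toNat = 0 := by omega
    simp [h, h0, refSym]
  · have h1 : (depth - cur).toNat = (depth - (cur + 1)).toNat + 1 := by omega
    rw [h1, refSym]
    simp only [h, dite_false]
    exact unpackRuleAList_eq_ref g depth (pvLookup g s) (cur + 1)
termination_by ((depth - cur).toNat, 0)
theorem unpackRuleAList_eq_ref (g : List (String × List String)) (depth : Int) (items : List String) (d : Int) :
    unpackRuleAList g depth items d = refList g depth items (depth - d).toNat := by
  match items with
  | [] => rw [unpackRuleAList, refList]
  | item :: rest =>
      rw [unpackRuleAList, refList]
      rw [unpackRuleA_eq_ref g depth item d, unpackRuleAList_eq_ref g depth rest d]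
termination_by ((depth - d).toNat, items.length + 1)
end

-- the memo invariant: every stored entry is the reference value of its key
def MemoInv (g : List (String × List String)) (depth : Int)
    (memo : PySem.Dict (String × Int) (List String)) : Prop :=
  ∀ (s : String) (m : Nat) (v : List String),
    memo.get? (s, (m : Int)) = some v → v = refSym g depth s m

-- B's memoized recursion computes the reference value and preserves the invariant
-- storing the reference value of a key keeps the invariant
theorem memoInv_insert (g : List (String × List String)) (depth : Int)
    (memo : PySem.Dict (String × Int) (List String)) (h : MemoInv g depth memo)
    (s : String) (m : Nat) :
    MemoInv g depth (memo.insert (s, (m : Int)) (refSym g depth s m)) := by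
  intro s' m' v hv
  rw [PySem.Dict.get?_insert] at hv
  by_cases he : ((s', (m' : Int)) : String × Int) = (s, (m : Int))
  · have hs : s' = s := congrArg Prod.fst he
    have hm : m' = m := by have := congrArg Prod.snd he; simp at this; omega
    rw [if_pos he] at hv
    cases hv; rw [hs, hm]
  · rw [if_neg he] at hv
    exact h s' m' v hv

mutual
theorem unpackRuleB_eq_ref (g : List (String × List String)) (depth : Int) (s : String) (m : Nat)
    (memo : PySem.Dict (String × Int) (List String)) (h : MemoInv g depth memo) :
    (unpackRuleB g depth s m memo).1 = refSym g depth s m ∧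
      MemoInv g depth (unpackRuleB g depth s m memo).2 := by
  rw [unpackRuleB.eq_def]
  cases hm : memo.get? (s, (m : Int)) with
  | some v => exact ⟨h s m v hm, h⟩
  | none =>
    match m with
    | 0 =>
        refine ⟨by rw [refSym], ?_⟩
        have := memoInv_insert g depth memo h s 0
        rw [refSym] at this
        simpa using this
    | n + 1 =>
        have ih := unpackRuleBList_eq_ref g depth (pvLookup g s) n memo h
        rcases hres : unpackRuleBList g depth (pvLookup g s) n memo with ⟨r, m1⟩
        rw [hres] at ih
        simp only at ih
        refine ⟨by simp only [hres]; rw [refSym]; exact ih.1, ?_⟩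
        simp only [hres]
        have := memoInv_insert g depth m1 ih.2 s (n + 1)
        rw [refSym] at this
        rw [← ih.1] at this
        simpa using this
termination_by (m, 0)
theorem unpackRuleBList_eq_ref (g : List (String × List String)) (depth : Int) (items : List String) (n : Nat)
    (memo : PySem.Dict (String × Int) (List String)) (h : MemoInv g depth memo) :
    (unpackRuleBList g depth items n memo).1 = refList g depth items n ∧
      MemoInv g depth (unpackRuleBList g depth items n memo).2 := by
  match items with
  | [] => rw [unpackRuleBList, refList]; exact ⟨rfl, h⟩
  | item :: rest =>
      rw [unpackRuleBList, refList]
      by_cases hk : pvHasKey g item = true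
      · have ih1 := unpackRuleB_eq_ref g depth item n memo h
        rcases h1 : unpackRuleB g depth item n memo with ⟨v, m1⟩
        rw [h1] at ih1
        have ih2 := unpackRuleBList_eq_ref g depth rest n m1 ih1.2
        rcases h2 : unpackRuleBList g depth rest n m1 with ⟨vs, m2⟩
        rw [h2] at ih2
        simp only [hk, if_true, h2]
        exact ⟨by
          show v ++ vs = _
          rw [show v = refSym g depth item n from ih1.1,
            show vs = refList g depth rest n from ih2.1], ih2.2⟩
      · have ih2 := unpackRuleBList_eq_ref g depth rest n memo h
        rcases h2 : unpackRuleBList g depth rest n memo with ⟨vs, m2⟩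
        rw [h2] at ih2
        simp only [hk, Bool.false_eq_true, if_false]
        exact ⟨by
          show item :: vs = _
          rw [show vs = refList g depth rest n from ih2.1], ih2.2⟩
termination_by (n, items.length + 1)
end

theorem unpackAllB_eq (g : List (String × List String)) (depth : Int) (pending : List (String × List String))
    (top : Nat) (memo : PySem.Dict (String × Int) (List String)) (h : MemoInv g depth memo) :
    unpackAllB g depth pending top memo = pending.map (fun p => (p.1, refSym g depth p.1 top)) := by
  induction pending generalizing memo with
  | nil => rw [unpackAllB]; rfl
  | cons p rest ih =>
      rw [unpackAllB]
      have ihp := unpackRuleB_eq_ref g depth p.1 top memo h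
      rcases h1 : unpackRuleB g depth p.1 top memo with ⟨r, m1⟩
      rw [h1] at ihp
      simp only [List.map_cons]
      rw [show r = refSym g depth p.1 top from ihp.1, ih m1 ihp.2]

-- ===== VERDICT (by name: the statement is the Claim_ definition above) =====
theorem grammar_unpacker_spec : Claim_equal_grammar_unpacker := by
  intro grammar depth _ _
  unfold Spec_grammar_unpacker grammar_unpacker grammar_unpacker_alt
  rw [PySem.List.foldl_append_singleton_eq_map]
  rw [unpackAllB_eq _ _ _ _ _ (by intro s m v hv; simp [PySem.Dict.get?_empty] at hv)]
  simp [unpackRuleA_eq_ref]
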